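-- pv_equiv track=rewrite | github.com/UWPCE-PythonCert-ClassRepos/Wi2018-Classroom | students/rusty_mann/session04/katas.py | build_words
-- ===== SOURCE A (Python) =====
-- def build_words(text):
--     bad_chars = ",.-(\)/"
--     #text = f.read()
--     for c in bad_chars:
--         text = text.replace(c, ' ')
--         text = text.lower()
--     words = text.split()
--     for n, word in enumerate(words):
--         if word == 'i':
--             words[n] = "I"
--         #little_i = 'i'
--         #for i in little_i:
--             #word = word.replace(i, 'I')
--         #else:
--             #word
--     #for word in words:
--         #if word != "'":
--     return words
-- ===== SOURCE B (Python) =====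
-- def build_words(text):
--     bad = set(",.-(\)/")
--     cleaned = ''.join(' ' if c in bad else c.lower() for c in text)
--     return ['I' if w == 'i' else w for w in cleaned.split()]
-- ===== Notes on version B (the rewrite author's own statement) =====
-- stated objective: simpler
-- what changed: Replaces the six replace+lower full-string passes and the in-place enumerate mutation with a single character-level scan (join over a generator) followed by one list comprehension.
import Mathlib
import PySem

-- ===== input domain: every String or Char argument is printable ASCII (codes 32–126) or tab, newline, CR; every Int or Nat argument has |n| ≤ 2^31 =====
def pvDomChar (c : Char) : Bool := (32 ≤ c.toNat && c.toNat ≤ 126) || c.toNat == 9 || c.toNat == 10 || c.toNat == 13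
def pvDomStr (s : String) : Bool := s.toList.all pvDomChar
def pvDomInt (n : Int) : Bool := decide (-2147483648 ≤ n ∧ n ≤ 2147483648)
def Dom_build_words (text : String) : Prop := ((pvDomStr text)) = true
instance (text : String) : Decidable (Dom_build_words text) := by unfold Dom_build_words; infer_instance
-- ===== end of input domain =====

-- ===== PORT A =====
-- B changes: one character-level scan + a comprehension instead of six replace+lower
-- full-string passes and an in-place enumerate loop (objective: simpler).
-- (A rebinds its local 'text'/'words'; the caller observes only the return value.)

-- the characters of A's bad_chars string ",.-(\)/" (the \ is a literal backslash in Python)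
def pvBadChars : List Char := [',', '.', '-', '(', '\\', ')', '/']

def build_words (text : String) : List String :=
  -- for c in bad_chars: text = text.replace(c, ' '); text = text.lower()
  let text := pvBadChars.foldl
    (fun t c => PySem.Str.lower (PySem.Str.replace t (String.ofList [c]) " ")) text
  let words := PySem.Str.split₀ text
  -- for n, word in enumerate(words): if word == 'i': words[n] = "I"
  -- (n comes from enumerate, so n ≥ 0 and n < len(words): .set n.toNat is exact here)
  (PySem.List.enumerate words).foldl
    (fun ws nw => if nw.2 == "i" then ws.set nw.1.toNat "I" else ws) words

-- ===== PORT B =====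
def build_words_alt (text : String) : List String :=
  -- cleaned = ''.join(' ' if c in bad else c.lower() for c in text)  (c.lower() on one char = lowerChar)
  let cleaned : List Char :=
    text.toList.map (fun c => if pvBadChars.contains c then ' ' else PySem.Chars.lowerChar c)
  -- ['I' if w == 'i' else w for w in cleaned.split()]
  ((PySem.Chars.split₀ cleaned).map String.ofList).map (fun w => if w == "i" then "I" else w)

-- ===== PRECONDITION & SPEC =====
def Spec_build_words (text : String) (out : List String) : Prop := out = build_words_alt text
instance (text : String) (out : List String) : Decidable (Spec_build_words text out) := by unfold Spec_build_words; infer_instance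

-- ===== CLAIM (what is proved, stated in full; the proofs are below) =====
def Claim_equal_build_words : Prop := ∀ (text : String), Dom_build_words text → Spec_build_words text (build_words text)

-- ===== LEMMAS AND PROOFS =====

-- s.replace(b, ' ') for a single character b is a character map
theorem go_single (b : Char) : ∀ (fuel : Nat) (l acc : List Char), l.length ≤ fuel →
    PySem.Chars.replace.go [b] [' '] fuel l acc
      = acc.reverse ++ l.map (fun c => if c = b then ' ' else c) := by
  intro fuel
  induction fuel with
  | zero => intro l acc h; simp at h; simp [h, PySem.Chars.replace.go]
  | succ n ih =>
    intro l acc h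
    cases l with
    | nil => simp [PySem.Chars.replace.go]
    | cons c t =>
      simp only [PySem.Chars.replace.go]
      by_cases hc : c = b
      · simp [hc, List.isPrefixOf, ih t _ (by simpa using h)]
      · simp [List.isPrefixOf, hc, ih t _ (by simpa using h)]
        intro e; exact absurd e.symm hc

theorem replace_single (b : Char) (cs : List Char) :
    PySem.Chars.replace cs [b] [' '] = cs.map (fun c => if c = b then ' ' else c) := by
  simp [PySem.Chars.replace, go_single b cs.length cs [] le_rfl]

-- one pass of A's loop body, on the char-list level, is a map
theorem step_map (b : Char) (cs : List Char) :
    PySem.Chars.lower (PySem.Chars.replace cs [b] [' '])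
      = cs.map (fun c => PySem.Chars.lowerChar (if c = b then ' ' else c)) := by
  simp [PySem.Chars.lower, replace_single, List.map_map, Function.comp_def]

theorem toNat_lower (c : Char) (h : 65 ≤ c.toNat ∧ c.toNat ≤ 90) :
    (Char.ofNat (c.toNat + 32)).toNat = c.toNat + 32 := by
  have : c.toNat + 32 < 1114112 := by omega
  simp [Char.toNat_ofNat, this]; omega

theorem isupper_iff (c : Char) :
    PySem.Chars.isupper c = true ↔ 65 ≤ c.toNat ∧ c.toNat ≤ 90 := by
  simp only [PySem.Chars.isupper, Bool.and_eq_true, decide_eq_true_eq, Char.le_def,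
    UInt32.le_iff_toNat_le, Char.toNat]
  simp

theorem lowerChar_toNat_of_upper (c : Char) (h : PySem.Chars.isupper c = true) :
    (PySem.Chars.lowerChar c).toNat = c.toNat + 32 := by
  rw [isupper_iff] at h
  simp [PySem.Chars.lowerChar, isupper_iff, h, toNat_lower c h]

-- nothing lowers onto a char outside both letter ranges (e.g. A's punctuation)
theorem lowerChar_eq_iff (b c : Char)
    (hb : ¬ (97 ≤ b.toNat ∧ b.toNat ≤ 122)) (hb2 : ¬ (65 ≤ b.toNat ∧ b.toNat ≤ 90)) :
    PySem.Chars.lowerChar c = b ↔ c = b := by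
  by_cases h : PySem.Chars.isupper c = true
  · have ht := lowerChar_toNat_of_upper c h
    have hc := (isupper_iff c).1 h
    constructor
    · intro e; exfalso; apply hb; rw [← e]; omega
    · intro e; exfalso; apply hb2; rw [← e]; exact hc
  · simp [PySem.Chars.lowerChar, h]

theorem lowerChar_idem (c : Char) :
    PySem.Chars.lowerChar (PySem.Chars.lowerChar c) = PySem.Chars.lowerChar c := by
  by_cases h : PySem.Chars.isupper c = true
  · have ht := lowerChar_toNat_of_upper c h
    have hc := (isupper_iff c).1 h
    have hnot : ¬ PySem.Chars.isupper (PySem.Chars.lowerChar c) = true := by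
      rw [isupper_iff]; omega
    simp [PySem.Chars.lowerChar]
    intro hh; exact absurd hh hnot
  · simp [PySem.Chars.lowerChar, h]

-- A's seven scrubbing passes, composed, act on each char as B's single map does
theorem clean_eq (cs : List Char) :
    pvBadChars.foldl (fun t b => PySem.Chars.lower (PySem.Chars.replace t [b] [' '])) cs
      = cs.map (fun c => if pvBadChars.contains c then ' ' else PySem.Chars.lowerChar c) := by
  simp only [pvBadChars, List.foldl_cons, List.foldl_nil, step_map, List.map_map]
  apply List.map_congr_left
  intro c _
  simp only [Function.comp_def]
  by_cases hc : c = ',' ∨ c = '.' ∨ c = '-' ∨ c = '(' ∨ c = '\\' ∨ c = ')' ∨ c = '/'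
  · rcases hc with h|h|h|h|h|h|h <;> subst h <;> decide
  · push_neg at hc
    obtain ⟨n1, n2, n3, n4, n5, n6, n7⟩ := hc
    have key : ∀ b : Char, c ≠ b → ¬ (97 ≤ b.toNat ∧ b.toNat ≤ 122) →
        ¬ (65 ≤ b.toNat ∧ b.toNat ≤ 90) → ¬ PySem.Chars.lowerChar c = b := by
      intro b hne hb hb2 e
      exact hne ((lowerChar_eq_iff b c hb hb2).1 e)
    have e2 := key '.' n2 (by decide) (by decide)
    have e3 := key '-' n3 (by decide) (by decide)
    have e4 := key '(' n4 (by decide) (by decide)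
    have e5 := key '\\' n5 (by decide) (by decide)
    have e6 := key ')' n6 (by decide) (by decide)
    have e7 := key '/' n7 (by decide) (by decide)
    simp [n1, e2, e3, e4, e5, e6, e7, lowerChar_idem]
    intro h
    rcases h with h|h|h|h|h|h <;> simp_all

-- A's enumerate/set loop is B's comprehension
theorem enum_set_eq_map (l : List String) : ∀ (pre : List String),
    (PySem.List.enumerate l (pre.length : Int)).foldl
        (fun ws nw => if nw.2 == "i" then ws.set nw.1.toNat "I" else ws) (pre ++ l)
      = pre ++ l.map (fun w => if w == "i" then "I" else w) := by
  induction l with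
  | nil => intro pre; simp [PySem.List.enumerate]
  | cons x t ih =>
    intro pre
    have hlenI : ((pre.length : Int) + 1) = (((pre ++ ["I"]).length : Int)) := by simp
    have hlenx : ((pre.length : Int) + 1) = (((pre ++ [x]).length : Int)) := by simp
    simp only [PySem.List.enumerate, List.foldl_cons]
    by_cases hx : x = "i"
    · subst hx
      have hset : (pre ++ "i" :: t).set pre.length "I" = (pre ++ ["I"]) ++ t := by
        simp [List.append_assoc]
      simp only [show (("i" : String) == "i") = true from rfl, if_true, Int.toNat_natCast,
        hset, hlenI, ih (pre ++ ["I"])]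
      simp [List.append_assoc]
    · have hbe : (x == "i") = false := by simp [hx]
      have h2 : pre ++ x :: t = (pre ++ [x]) ++ t := by simp
      simp only [hbe, Bool.false_eq_true, if_false, h2, hlenx, ih (pre ++ [x])]
      simp [hx, List.append_assoc]

-- ===== VERDICT (by name: the statement is the Claim_ definition above) =====
set_option maxHeartbeats 1000000 in
theorem build_words_spec : Claim_equal_build_words := by
  intro text _
  unfold Spec_build_words build_words build_words_alt
  dsimp only []
  have hstep : ∀ (t : String) (b : Char),
      PySem.Chars.lower (PySem.Chars.replace t.toList [b] [' '])
        = (PySem.Str.lower (PySem.Str.replace t (String.ofList [b]) " ")).toList := by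
    intro t b
    rw [PySem.Str.toList_lower, PySem.Str.toList_replace]
    simp [show (" " : String).toList = [' '] from rfl]
  have hfold : pvBadChars.foldl
        (fun t b => PySem.Chars.lower (PySem.Chars.replace t [b] [' '])) text.toList
      = (pvBadChars.foldl
        (fun t c => PySem.Str.lower (PySem.Str.replace t (String.ofList [c]) " ")) text).toList :=
    by simp only [pvBadChars, List.foldl_cons, List.foldl_nil, hstep]
  have hwords :
      PySem.Str.split₀ (pvBadChars.foldl
          (fun t c => PySem.Str.lower (PySem.Str.replace t (String.ofList [c]) " ")) text)
        = (PySem.Chars.split₀ (text.toList.map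
            (fun c => if pvBadChars.contains c then ' ' else PySem.Chars.lowerChar c))).map
            String.ofList := by
    simp only [PySem.Str.split₀]
    rw [← hfold, clean_eq]
  rw [hwords]
  have := enum_set_eq_map ((PySem.Chars.split₀ (text.toList.map
      (fun c => if pvBadChars.contains c then ' ' else PySem.Chars.lowerChar c))).map
      String.ofList) []
  simpa using this
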